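-- pv_equiv track=rewrite | github.com/fidabspd/algorithm | codes/programmers/practice-[3차] 방금그곡.py | split_music
-- ===== SOURCE A (Python) =====
-- def split_music(music):
--     new_music = []
--     i = 0
--     while i < len(music):
--         if i+1 < len(music):
--             if music[i+1] == '#':
--                 new_music.append(music[i:i+2])
--                 i += 1
--             else:
--                 new_music.append(music[i])
--         else:
--             new_music.append(music[i])
--         i += 1
--     return new_music
-- ===== SOURCE B (Python) =====
-- def split_music(music):
--     out = []
--     for c in music:
--         if c == '#' and out and len(out[-1]) == 1:
--             out[-1] += c
--         else:
--             out.append(c)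
--     return out
-- ===== Notes on version B (the rewrite author's own statement) =====
-- stated objective: simpler
-- what changed: Replaces the index-based while loop with forward lookahead by a single for-each pass that appends each character as a new token and merges a sharp sign into the previous token when that token has length 1 (look-back instead of look-ahead, no index arithmetic or slicing).
import Mathlib
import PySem

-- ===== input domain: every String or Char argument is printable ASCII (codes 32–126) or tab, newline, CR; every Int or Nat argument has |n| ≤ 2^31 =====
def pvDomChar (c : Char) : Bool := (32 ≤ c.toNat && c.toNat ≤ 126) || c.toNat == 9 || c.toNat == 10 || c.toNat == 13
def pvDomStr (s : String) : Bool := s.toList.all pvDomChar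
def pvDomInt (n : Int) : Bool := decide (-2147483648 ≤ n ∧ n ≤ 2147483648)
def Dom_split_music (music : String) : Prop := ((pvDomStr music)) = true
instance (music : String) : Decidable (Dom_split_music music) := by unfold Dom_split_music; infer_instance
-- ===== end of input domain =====

-- B replaces A's index/lookahead while loop by a single look-back fold; return values proved equal on all strings.

-- ===== PORT A =====
-- while loop over index i; music[i] / music[i+1] / slice music[i:i+2] transliterated
def aLoop (cs : List Char) (i : Nat) (acc : List String) : List String :=
  if h1 : i < cs.length then
    if h2 : i + 1 < cs.length then
      if cs[i+1] = '#' then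
        -- new_music.append(music[i:i+2]); i += 1; i += 1
        aLoop cs (i + 1 + 1) (acc ++ [String.ofList (PySem.List.slice cs (some (i : Int)) (some ((i : Int) + 2)))])
      else
        aLoop cs (i + 1) (acc ++ [String.ofList [cs[i]]])
    else
      aLoop cs (i + 1) (acc ++ [String.ofList [cs[i]]])
  else acc
termination_by cs.length - i

def split_music (music : String) : List String :=
  aLoop music.toList 0 []

-- ===== PORT B =====
-- one fold step: merge '#' into a length-1 last token, else append a new one-char token
def bStep (out : List (List Char)) (c : Char) : List (List Char) :=
  if c = '#' ∧ out ≠ [] ∧ (out.getLastD []).length = 1 then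
    out.dropLast ++ [out.getLastD [] ++ [c]]
  else
    out ++ [[c]]

def split_music_alt (music : String) : List String :=
  (music.toList.foldl bStep []).map (fun t => String.ofList t)

-- ===== PRECONDITION & SPEC =====
def Spec_split_music (music : String) (out : List String) : Prop := out = split_music_alt music
instance (music : String) (out : List String) : Decidable (Spec_split_music music out) := by unfold Spec_split_music; infer_instance

-- ===== CLAIM (what is proved, stated in full; the proofs are below) =====
def Claim_equal_split_music : Prop := ∀ (music : String), Dom_split_music music → Spec_split_music music (split_music music)

-- ===== LEMMAS AND PROOFS =====

-- common characterisation: the token list both programs produce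
def tok : List Char → List (List Char)
  | [] => []
  | [c] => [[c]]
  | c :: d :: rest => if d = '#' then [c, d] :: tok rest else [c] :: tok (d :: rest)

lemma bStep_append (out : List (List Char)) (c : Char)
    (h : c = '#' → out = [] ∨ ∃ t, out.getLast? = some t ∧ t.length = 2) :
    bStep out c = out ++ [[c]] := by
  unfold bStep
  rw [if_neg]
  rintro ⟨hc, hne, hlen⟩
  rcases h hc with h0 | ⟨t, ht, ht2⟩
  · exact hne h0
  · rw [List.getLastD_eq_getLast?, ht] at hlen
    simp at hlen; omega

lemma fold_tok : ∀ (cs : List Char) (out : List (List Char)),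
    (cs.head? = some '#' → out = [] ∨ ∃ t, out.getLast? = some t ∧ t.length = 2) →
    List.foldl bStep out cs = out ++ tok cs := by
  intro cs
  induction cs using tok.induct with
  | case1 => intro out _; simp [tok]
  | case2 c =>
    intro out h
    have h1 : bStep out c = out ++ [[c]] := bStep_append out c (fun hc => h (by simp [hc]))
    simp [List.foldl, h1, tok]
  | case3 c rest ih =>
    intro out h
    have h1 : bStep out c = out ++ [[c]] := bStep_append out c (fun hc => h (by simp [hc]))
    have h2 : bStep (out ++ [[c]]) '#' = out ++ [[c, '#']] := by
      unfold bStep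
      rw [if_pos]
      · simp
      · refine ⟨rfl, by simp, ?_⟩
        simp
    have h3 := ih (out ++ [[c, '#']]) (fun _ => Or.inr ⟨[c, '#'], by simp, by simp⟩)
    rw [List.foldl_cons, h1, List.foldl_cons, h2, h3]
    simp [tok]
  | case4 c d rest hd ih =>
    intro out h
    have h1 : bStep out c = out ++ [[c]] := bStep_append out c (fun hc => h (by simp [hc]))
    have h3 := ih (out ++ [[c]]) (fun hh => (hd (by simpa using hh)).elim)
    rw [List.foldl_cons, h1, h3]
    simp [tok, hd]

lemma aLoop_eq : ∀ (n : Nat) (cs : List Char) (i : Nat) (acc : List String),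
    cs.length - i ≤ n → aLoop cs i acc = acc ++ (tok (cs.drop i)).map String.ofList := by
  intro n
  induction n with
  | zero =>
    intro cs i acc h
    rw [aLoop, dif_neg (by omega), List.drop_eq_nil_of_le (by omega)]
    simp [tok]
  | succ n ih =>
    intro cs i acc h
    rw [aLoop]
    by_cases h1 : i < cs.length
    · rw [dif_pos h1]
      have hdrop : cs.drop i = cs[i] :: cs.drop (i + 1) := List.drop_eq_getElem_cons h1
      by_cases h2 : i + 1 < cs.length
      · rw [dif_pos h2]
        have hdrop2 : cs.drop (i + 1) = cs[i + 1] :: cs.drop (i + 1 + 1) :=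
          List.drop_eq_getElem_cons h2
        by_cases h3 : cs[i + 1] = '#'
        · rw [if_pos h3, ih cs (i + 1 + 1) _ (by omega)]
          have hs : PySem.List.slice cs (some (i : Int)) (some ((i : Int) + 2)) =
              [cs[i], cs[i + 1]] := by
            have h4 : ((i : Int) + 2) = ((i : Int) + ((2 : Nat) : Int)) := by push_cast; ring
            rw [h4, PySem.List.slice_natCast_add, hdrop, hdrop2]
            rw [show (2 : Nat) = 0 + 1 + 1 from rfl]
            simp only [List.take_succ_cons, List.take_zero]
          rw [hs, hdrop, hdrop2]
          simp [tok, h3]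
        · rw [if_neg h3, ih cs (i + 1) _ (by omega), hdrop, hdrop2]
          simp [tok, h3]
      · have e1 : List.drop (i + 1) cs = [] := List.drop_eq_nil_of_le (by omega)
        rw [dif_neg h2, ih cs (i + 1) _ (by omega), e1, hdrop, e1]
        simp [tok]
    · rw [dif_neg h1, List.drop_eq_nil_of_le (by omega)]
      simp [tok]

-- ===== VERDICT (by name: the statement is the Claim_ definition above) =====
theorem split_music_spec : Claim_equal_split_music := by
  intro music _
  unfold Spec_split_music split_music split_music_alt
  rw [aLoop_eq (music.toList.length) music.toList 0 [] (by omega)]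
  rw [fold_tok music.toList [] (fun _ => Or.inl rfl)]
  simp
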